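-- pv_equiv track=rewrite | github.com/julianrosen/mhs | file_io.py | make_rat
-- ===== SOURCE A (Python) =====
-- def make_rat(s):
--     T = ""
--     num = False
--     for x in s:
--         if num and x not in [str(i) for i in range(10)]:
--             T += ')'
--             num = False
--         T += x
--         if x == '/':
--             T += "Rat("
--             num = True
--     if num:
--         T += ')'
--     return T
-- ===== SOURCE B (Python) =====
-- def make_rat(s):
--     out = []
--     i = 0
--     while True:
--         j = s.find('/', i)
--         if j == -1:
--             out.append(s[i:])
--             return ''.join(out)
--         k = j + 1
--         while k < len(s) and '0' <= s[k] <= '9':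
--             k += 1
--         out.append(s[i:j + 1] + 'Rat(' + s[j + 1:k] + ')')
--         i = k
-- ===== Notes on version B (the rewrite author's own statement) =====
-- stated objective: faster
-- what changed: A walks the string character by character with a boolean digit-run state flag and one-character string concatenations; B instead jumps with str.find to each slash, slices out the digit run that follows, and appends whole chunks to a list joined once at the end.
import Mathlib
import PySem

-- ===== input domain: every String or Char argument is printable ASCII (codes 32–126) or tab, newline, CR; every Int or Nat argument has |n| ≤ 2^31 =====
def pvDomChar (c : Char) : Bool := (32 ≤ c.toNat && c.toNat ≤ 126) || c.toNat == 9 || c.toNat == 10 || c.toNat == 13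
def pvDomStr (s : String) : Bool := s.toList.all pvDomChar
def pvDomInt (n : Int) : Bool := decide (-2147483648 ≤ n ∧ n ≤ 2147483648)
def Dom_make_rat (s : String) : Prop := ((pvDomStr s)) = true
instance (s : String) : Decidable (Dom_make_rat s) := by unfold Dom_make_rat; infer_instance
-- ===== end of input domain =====

-- B replaces A's per-character state machine by a find-and-slice chunk builder (jump to each '/',
-- take the digit run after it, emit whole slices and join them at the end).


-- ===== PORT A =====
-- A's `x not in [str(i) for i in range(10)]`: x is a one-character string compared against the
-- ten one-character digit strings, so at the Char level it is membership in ['0'..'9'] (exact).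
def pyDigitChars : List Char := ['0','1','2','3','4','5','6','7','8','9']

-- one iteration of A's `for x in s` loop over the state (T, num)
def make_rat_step (st : List Char × Bool) (x : Char) : List Char × Bool :=
  let st1 := if st.2 && !(pyDigitChars.contains x) then (st.1 ++ [')'], false) else st
  let T := st1.1 ++ [x]
  if x = '/' then (T ++ ("Rat(").toList, true) else (T, st1.2)

def make_rat (s : String) : String :=
  String.mk
    (if (s.toList.foldl make_rat_step ([], false)).2 then
      (s.toList.foldl make_rat_step ([], false)).1 ++ [')']     -- trailing `if num: T += ')'`
     else (s.toList.foldl make_rat_step ([], false)).1)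

-- ===== PORT B =====
-- B's inner test `'0' <= s[k] <= '9'`
def isDig09 (c : Char) : Bool := '0' ≤ c && c ≤ '9'

-- B's outer `while True` loop, on the remaining suffix s[i:]: `s.find('/', i)` splits the suffix
-- as takeWhile/dropWhile at the first '/'; if there is none (j == -1) the suffix is appended and
-- the chunks joined, else one chunk s[i:j+1] + 'Rat(' + s[j+1:k] + ')' is emitted and i moves to k.
def make_rat_alt_go (cs : List Char) : List Char :=
  if h : (cs.dropWhile (fun c => !(c == '/'))).isEmpty then
    cs.takeWhile (fun c => !(c == '/'))
  else
    cs.takeWhile (fun c => !(c == '/')) ++ '/' ::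
      (("Rat(").toList ++ (cs.dropWhile (fun c => !(c == '/'))).tail.takeWhile isDig09 ++
        ([')'] ++ make_rat_alt_go ((cs.dropWhile (fun c => !(c == '/'))).tail.dropWhile isDig09)))
termination_by cs.length
decreasing_by
  have h1 := List.length_dropWhile_le (fun c => !(c == '/')) cs
  have h2 := List.length_dropWhile_le isDig09 (cs.dropWhile (fun c => !(c == '/'))).tail
  have h3 : (cs.dropWhile (fun c => !(c == '/'))).length ≠ 0 := by
    simpa [List.isEmpty_iff_length_eq_zero] using h
  simp only [List.length_tail] at h2 ⊢
  omega

def make_rat_alt (s : String) : String := String.mk (make_rat_alt_go s.toList)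

-- ===== PRECONDITION & SPEC =====
def Spec_make_rat (s : String) (out : String) : Prop := out = make_rat_alt s
instance (s : String) (out : String) : Decidable (Spec_make_rat s out) := by unfold Spec_make_rat; infer_instance

-- ===== CLAIM (what is proved, stated in full; the proofs are below) =====
def Claim_equal_make_rat : Prop := ∀ (s : String), Dom_make_rat s → Spec_make_rat s (make_rat s)

-- ===== LEMMAS AND PROOFS =====

-- the tail of A's output produced from state `num` on the remaining input
def gA (num : Bool) : List Char → List Char
  | [] => if num then [')'] else []
  | x :: xs =>
      (if num && !(isDig09 x) then [')'] else []) ++ x ::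
        (if x = '/' then ("Rat(").toList ++ gA true xs else gA (num && isDig09 x) xs)

theorem contains_eq_isDig09 (x : Char) : pyDigitChars.contains x = isDig09 x := by
  rcases x with ⟨v, hv⟩
  simp only [pyDigitChars, isDig09, List.contains_eq_mem, List.mem_cons, List.not_mem_nil,
    or_false, Char.ext_iff, Char.le_def, UInt32.le_iff_toNat_le, ← UInt32.toNat_inj]
  rw [Bool.eq_iff_iff]
  simp only [decide_eq_true_eq, Bool.and_eq_true, decide_eq_true_eq]
  have e0 : ('0' : Char).val.toNat = 48 := by decide
  have e1 : ('1' : Char).val.toNat = 49 := by decide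
  have e2 : ('2' : Char).val.toNat = 50 := by decide
  have e3 : ('3' : Char).val.toNat = 51 := by decide
  have e4 : ('4' : Char).val.toNat = 52 := by decide
  have e5 : ('5' : Char).val.toNat = 53 := by decide
  have e6 : ('6' : Char).val.toNat = 54 := by decide
  have e7 : ('7' : Char).val.toNat = 55 := by decide
  have e8 : ('8' : Char).val.toNat = 56 := by decide
  have e9 : ('9' : Char).val.toNat = 57 := by decide
  rw [e0, e1, e2, e3, e4, e5, e6, e7, e8, e9]
  omega

-- A's loop + trailing close, started from (T, num), appends exactly gA num of the rest
theorem foldA (xs : List Char) : ∀ (T : List Char) (num : Bool),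
    (if (xs.foldl make_rat_step (T, num)).2 then (xs.foldl make_rat_step (T, num)).1 ++ [')']
     else (xs.foldl make_rat_step (T, num)).1) = T ++ gA num xs := by
  induction xs with
  | nil => intro T num; cases num <;> simp [gA]
  | cons x xs ih =>
      intro T num
      simp only [List.foldl_cons, make_rat_step, contains_eq_isDig09, gA]
      by_cases hx : x = '/'
      · subst hx
        have hslash : isDig09 '/' = false := by decide
        cases num <;> simp [hslash, ih, List.append_assoc]
      · by_cases hnd : num && !(isDig09 x)
        · have hnum : (num && isDig09 x) = false := by
            cases num <;> cases hd : isDig09 x <;> simp_all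
          simp [hnd, hx, hnum, ih, List.append_assoc]
        · simp only [Bool.not_eq_true] at hnd
          have hnum : (num && isDig09 x) = num := by
            cases num <;> cases hd : isDig09 x <;> simp_all
          simp [hnd, hx, hnum, ih]

-- gA from state true first copies the maximal digit run, then closes and resumes from state false
theorem gA_true (xs : List Char) :
    gA true xs = xs.takeWhile isDig09 ++ [')'] ++ gA false (xs.dropWhile isDig09) := by
  induction xs with
  | nil => simp [gA]
  | cons x xs ih =>
      by_cases hd : isDig09 x
      · have hx : ¬ x = '/' := by
          intro h; subst h; simp [isDig09, Char.le_def] at hd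
        simp [gA, hx, List.takeWhile_cons, List.dropWhile_cons, hd, ih]
      · by_cases hx : x = '/'
        · subst hx
          simp [gA, List.takeWhile_cons, List.dropWhile_cons, hd]
        · simp [gA, hx, List.takeWhile_cons, List.dropWhile_cons, hd]

-- B's chunk recursion commutes with a non-'/' head character
theorem altGo_cons_ne (x : Char) (xs : List Char) (hx : ¬ x = '/') :
    make_rat_alt_go (x :: xs) = x :: make_rat_alt_go xs := by
  have hb : (!(x == '/')) = true := by simpa using hx
  conv_lhs => rw [make_rat_alt_go]
  conv_rhs => rw [make_rat_alt_go]
  simp only [List.dropWhile_cons, List.takeWhile_cons, hb, if_true]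
  by_cases h : (xs.dropWhile (fun c => !(c == '/'))).isEmpty = true
  · rw [dif_pos h, dif_pos h]
  · rw [dif_neg h, dif_neg h, List.cons_append]

theorem gA_false_eq_altGo : ∀ (n : ℕ) (xs : List Char), xs.length ≤ n →
    gA false xs = make_rat_alt_go xs := by
  intro n
  induction n with
  | zero =>
      intro xs h
      have : xs = [] := by cases xs <;> simp_all
      subst this
      rw [make_rat_alt_go]; simp [gA]
  | succ n ih =>
      intro xs h
      cases xs with
      | nil => rw [make_rat_alt_go]; simp [gA]
      | cons x xs =>
        by_cases hx : x = '/'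
        · subst hx
          rw [make_rat_alt_go]
          simp only [List.dropWhile_cons, List.takeWhile_cons,
            show (!('/' == '/')) = false by decide, if_neg Bool.false_ne_true, List.isEmpty_cons]
          have hrec : gA false (xs.dropWhile isDig09) = make_rat_alt_go (xs.dropWhile isDig09) := by
            apply ih
            have := List.length_dropWhile_le isDig09 xs
            simp at h; omega
          simp [gA, gA_true, hrec, List.append_assoc]
        · rw [altGo_cons_ne x xs hx]
          have hrec : gA false xs = make_rat_alt_go xs := ih xs (by simp at h; omega)
          simp [gA, hx, hrec]

-- ===== VERDICT (by name: the statement is the Claim_ definition above) =====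
theorem make_rat_spec : Claim_equal_make_rat := by
  intro s _
  unfold Spec_make_rat make_rat make_rat_alt
  rw [foldA s.toList [] false, gA_false_eq_altGo s.toList.length s.toList le_rfl]
  simp
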